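-- pv_equiv track=rewrite | github.com/Chadillac12/db | chado/rag/chunking.py | _find_break
-- ===== SOURCE A (Python) =====
-- def _find_break(text: str, start: int, max_length: int) -> int:
--     window = text[start : start + max_length]
--     breakpoints = [
--         window.rfind("\n"),
--         window.rfind(". "),
--         window.rfind("; "),
--         window.rfind(" "),
--     ]
--     candidates = [point for point in breakpoints if point != -1]
--     if not candidates:
--         return start + max_length
--     best = max(candidates)
--     return start + best + 1
-- ===== SOURCE B (Python) =====
-- def _find_break(text: str, start: int, max_length: int) -> int:
--     # Single right-to-left scan: a ". " or "; " occurrence always has a plain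
--     # space right after its first character, so the rightmost delimiter start
--     # is always at a '\n' or ' ' character.
--     window = text[start : start + max_length]
--     for i in range(len(window) - 1, -1, -1):
--         c = window[i]
--         if c == "\n" or c == " ":
--             return start + i + 1
--     return start + max_length
-- ===== Notes on version B (the rewrite author's own statement) =====
-- stated objective: alternative
-- what changed: Replaces the four rfind library scans plus filter/max with a single right-to-left character scan, using the fact that '. ' and '; ' are subsumed by the later ' '.
import Mathlib
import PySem

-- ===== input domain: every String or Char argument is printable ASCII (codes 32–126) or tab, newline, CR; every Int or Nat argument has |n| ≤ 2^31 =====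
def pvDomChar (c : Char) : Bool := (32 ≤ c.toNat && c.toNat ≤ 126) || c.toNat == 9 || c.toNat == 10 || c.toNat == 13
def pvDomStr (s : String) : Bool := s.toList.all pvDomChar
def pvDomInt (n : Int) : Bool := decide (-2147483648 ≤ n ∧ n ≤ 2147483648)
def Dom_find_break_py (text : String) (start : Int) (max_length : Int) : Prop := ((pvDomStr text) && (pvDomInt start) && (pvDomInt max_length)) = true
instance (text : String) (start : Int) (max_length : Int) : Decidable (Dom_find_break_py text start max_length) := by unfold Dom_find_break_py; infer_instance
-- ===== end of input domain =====

-- B replaces A's four rfind scans + filter + max by a single right-to-left scan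
-- for '\n' or ' ' (a '. ' or '; ' match is always followed by a plain space);
-- objective: alternative (same cost, genuinely different strategy).

-- ===== PORT A =====
def find_break_py (text : String) (start : Int) (max_length : Int) : Int :=
  let window : String := PySem.Str.slice text (some start) (some (start + max_length))
  let breakpoints : List Int :=
    [PySem.Str.rfind window "\n", PySem.Str.rfind window ". ",
     PySem.Str.rfind window "; ", PySem.Str.rfind window " "]
  let candidates : List Int := breakpoints.filter (fun point => point != -1)
  match candidates with
  | [] => start + max_length
  | c :: rest => start + rest.foldl max c + 1

-- ===== PORT B =====
-- the 'for i in range(len(window)-1, -1, -1)' loop with its early return: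
-- checks indices n-1, n-2, …, 0, returning the first (rightmost) break index
def altGo (w : List Char) : Nat → Option Nat
  | 0 => none
  | i + 1 =>
      let c := w.getD i '\x00'
      if c = '\n' ∨ c = ' ' then some i else altGo w i

def find_break_py_alt (text : String) (start : Int) (max_length : Int) : Int :=
  let w : List Char := (PySem.Str.slice text (some start) (some (start + max_length))).toList
  match altGo w w.length with
  | some i => start + (i : Int) + 1
  | none => start + max_length

-- ===== PRECONDITION & SPEC =====
def Spec_find_break_py (text : String) (start : Int) (max_length : Int) (out : Int) : Prop := out = find_break_py_alt text start max_length
instance (text : String) (start : Int) (max_length : Int) (out : Int) : Decidable (Spec_find_break_py text start max_length out) := by unfold Spec_find_break_py; infer_instance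

-- ===== CLAIM (what is proved, stated in full; the proofs are below) =====
def Claim_equal_find_break_py : Prop := ∀ (text : String) (start : Int) (max_length : Int), Dom_find_break_py text start max_length → Spec_find_break_py text start max_length (find_break_py text start max_length)

-- ===== LEMMAS AND PROOFS =====

theorem go_zero (s sub : List Char) : PySem.Chars.rfind.go s sub 0 = if sub.isPrefixOf s then 0 else -1 := rfl

theorem go_succ (s sub : List Char) (j : Nat) :
    PySem.Chars.rfind.go s sub (j + 1) =
      if sub.isPrefixOf (s.drop (j + 1)) then ((j : Int) + 1) else PySem.Chars.rfind.go s sub j := rfl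

theorem go_le (w sub : List Char) : ∀ n : Nat, PySem.Chars.rfind.go w sub n ≤ (n : Int) := by
  intro n
  induction n with
  | zero => rw [go_zero]; split <;> simp
  | succ m ih => rw [go_succ]; split <;> omega

theorem go_le_succ (w sub : List Char) (n : Nat) :
    PySem.Chars.rfind.go w sub n ≤ (n : Int) + 1 :=
  le_trans (go_le w sub n) (by omega)

theorem go_neg_le (w sub : List Char) : ∀ n : Nat, -1 ≤ PySem.Chars.rfind.go w sub n := by
  intro n
  induction n with
  | zero => rw [go_zero]; split <;> simp
  | succ m ih => rw [go_succ]; split <;> omega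

theorem go_ge (w sub : List Char) (i : Nat) (hp : sub.isPrefixOf (w.drop i)) :
    ∀ n : Nat, i ≤ n → (i : Int) ≤ PySem.Chars.rfind.go w sub n := by
  intro n
  induction n with
  | zero =>
      intro h
      interval_cases i
      rw [go_zero]
      simp_all
  | succ m ih =>
      intro h
      rw [go_succ]
      split
      · omega
      · rename_i hfalse
        rcases Nat.lt_or_ge i (m + 1) with hlt | hge
        · exact ih (by omega)
        · exfalso; have : i = m + 1 := by omega
          subst this; simp_all

theorem go_spec (w sub : List Char) : ∀ n : Nat,
    PySem.Chars.rfind.go w sub n = -1 ∨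
      (0 ≤ PySem.Chars.rfind.go w sub n ∧
        sub.isPrefixOf (w.drop (PySem.Chars.rfind.go w sub n).toNat)) := by
  intro n
  induction n with
  | zero =>
      rw [go_zero]
      split <;> simp_all
  | succ m ih =>
      rw [go_succ]
      split
      · right
        constructor
        · omega
        · rename_i hp
          have : ((m : Int) + 1).toNat = m + 1 := by omega
          rw [this]; exact hp
      · exact ih

-- single-char prefix test ↔ indexing
theorem single_prefix_iff (w : List Char) (i : Nat) (c : Char) :
    ([c].isPrefixOf (w.drop i) = true) ↔ w[i]? = some c := by
  rw [List.isPrefixOf_iff_prefix]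
  constructor
  · rintro ⟨t, ht⟩
    have : (w.drop i)[0]? = some c := by rw [← ht]; simp
    simpa using this
  · intro h
    have h0 : (w.drop i)[0]? = some c := by simpa using h
    cases hd : w.drop i with
    | nil => simp [hd] at h0
    | cons x xs =>
        rw [hd] at h0
        simp at h0
        exact ⟨xs, by simp [h0]⟩

theorem cond_iff (w : List Char) (i : Nat) :
    (w.getD i '\x00' = '\n' ∨ w.getD i '\x00' = ' ') ↔ (w[i]? = some '\n' ∨ w[i]? = some ' ') := by
  cases h : w[i]? with
  | none => simp [List.getD_eq_getElem?_getD, h]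
  | some x => simp [List.getD_eq_getElem?_getD, h]

-- the B scan equals the max of the two single-char rfind scans
theorem altGo_eq_max (w : List Char) : ∀ n : Nat,
    (match altGo w (n + 1) with | some i => (i : Int) | none => -1) =
      max (PySem.Chars.rfind.go w ['\n'] n) (PySem.Chars.rfind.go w [' '] n) := by
  intro n
  induction n with
  | zero =>
      have h1 := single_prefix_iff w 0 '\n'
      have h2 := single_prefix_iff w 0 ' '
      have hc := cond_iff w 0
      rw [go_zero, go_zero]
      by_cases hnl : w[0]? = some '\n' <;> by_cases hsp : w[0]? = some ' ' <;>
        simp_all [altGo]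
  | succ m ih =>
      have h1 := single_prefix_iff w (m + 1) '\n'
      have h2 := single_prefix_iff w (m + 1) ' '
      have hc := cond_iff w (m + 1)
      have l1 := go_le w ['\n'] m
      have l2 := go_le w [' '] m
      have g1 := go_neg_le w ['\n'] m
      have g2 := go_neg_le w [' '] m
      rw [go_succ, go_succ]
      by_cases hnl : w[m + 1]? = some '\n' <;> by_cases hsp : w[m + 1]? = some ' ' <;>
        simp_all [altGo] <;>
        first
          | omega
          | exact go_le_succ w [' '] m
          | exact go_le_succ w ['\n'] m

-- rfind unfolds to its scan at n = length
theorem rfind_eq_go (w sub : List Char) : PySem.Chars.rfind w sub = PySem.Chars.rfind.go w sub w.length := rfl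

-- a ". " / "; " occurrence is immediately followed by a plain space, so its
-- rfind is strictly dominated by rfind " "
theorem dom2 (w : List Char) (c : Char) :
    PySem.Chars.rfind w [c, ' '] = -1 ∨
      PySem.Chars.rfind w [c, ' '] < PySem.Chars.rfind w [' '] := by
  rcases go_spec w [c, ' '] w.length with h | ⟨h0, hp⟩
  · left; exact h
  · right
    rw [rfind_eq_go w [c, ' '], rfind_eq_go w [' ']]
    set j := (PySem.Chars.rfind.go w [c, ' '] w.length).toNat with hj
    rw [List.isPrefixOf_iff_prefix] at hp
    rcases hp with ⟨t, ht⟩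
    have htl : [' '].isPrefixOf (w.drop (j + 1)) := by
      rw [List.isPrefixOf_iff_prefix]
      have : w.drop (j + 1) = (w.drop j).tail := by
        rw [← List.drop_drop]
        simp
      rw [this, ← ht]
      exact ⟨t, rfl⟩
    have hlen : j + 1 ≤ w.length := by
      by_contra hcon
      have : w.drop (j + 1) = [] := List.drop_eq_nil_of_le (by omega)
      rw [this] at htl
      simp at htl
    have := go_ge w [' '] (j + 1) htl w.length hlen
    omega

-- the B loop's result equals max(rfind "\n", rfind " ")
theorem altGo_link (w : List Char) :
    (match altGo w w.length with | some i => (i : Int) | none => -1) =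
      max (PySem.Chars.rfind w ['\n']) (PySem.Chars.rfind w [' ']) := by
  cases hl : w.length with
  | zero =>
      have hw : w = [] := List.length_eq_zero_iff.mp hl
      subst hw
      simp [altGo, rfind_eq_go, go_zero, List.isPrefixOf]
  | succ k =>
      have hd : w.drop (k + 1) = [] := List.drop_eq_nil_of_le (by omega)
      have h1 : PySem.Chars.rfind w ['\n'] = PySem.Chars.rfind.go w ['\n'] k := by
        rw [rfind_eq_go, hl, go_succ, hd]; simp [List.isPrefixOf]
      have h2 : PySem.Chars.rfind w [' '] = PySem.Chars.rfind.go w [' '] k := by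
        rw [rfind_eq_go, hl, go_succ, hd]; simp [List.isPrefixOf]
      rw [h1, h2]
      exact altGo_eq_max w k

-- the whole comparison, at the level of the shared window character list
theorem core (w : List Char) (start ml : Int) :
    (match ([PySem.Chars.rfind w ['\n'], PySem.Chars.rfind w ['.', ' '],
             PySem.Chars.rfind w [';', ' '], PySem.Chars.rfind w [' ']].filter
              (fun point => point != -1)) with
     | [] => start + ml
     | c :: rest => start + rest.foldl max c + 1) =
    (match altGo w w.length with
     | some i => start + (i : Int) + 1
     | none => start + ml) := by
  have link := altGo_link w
  have b1 : (-1 : Int) ≤ PySem.Chars.rfind w ['\n'] := go_neg_le w ['\n'] w.length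
  have b2 : (-1 : Int) ≤ PySem.Chars.rfind w ['.', ' '] := go_neg_le w ['.', ' '] w.length
  have b3 : (-1 : Int) ≤ PySem.Chars.rfind w [';', ' '] := go_neg_le w [';', ' '] w.length
  have b4 : (-1 : Int) ≤ PySem.Chars.rfind w [' '] := go_neg_le w [' '] w.length
  have d2 := dom2 w '.'
  have d3 := dom2 w ';'
  cases haltgo : altGo w w.length with
  | none =>
      rw [haltgo] at link
      simp only [] at link
      have h1 : PySem.Chars.rfind w ['\n'] = -1 := by omega
      have h4 : PySem.Chars.rfind w [' '] = -1 := by omega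
      have h2 : PySem.Chars.rfind w ['.', ' '] = -1 := by rcases d2 with h | h <;> omega
      have h3 : PySem.Chars.rfind w [';', ' '] = -1 := by rcases d3 with h | h <;> omega
      simp [h1, h2, h3, h4]
  | some i =>
      rw [haltgo] at link
      simp only [] at link
      by_cases h1 : PySem.Chars.rfind w ['\n'] = -1 <;>
        by_cases h2 : PySem.Chars.rfind w ['.', ' '] = -1 <;>
          by_cases h3 : PySem.Chars.rfind w [';', ' '] = -1 <;>
            by_cases h4 : PySem.Chars.rfind w [' '] = -1 <;>
              rcases d2 with d2 | d2 <;> rcases d3 with d3 | d3 <;>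
                simp_all <;> omega

theorem find_break_py_spec : Claim_equal_find_break_py := by
  intro text start max_length _
  unfold Spec_find_break_py find_break_py find_break_py_alt
  have e1 : "\n".toList = ['\n'] := rfl
  have e2 : ". ".toList = ['.', ' '] := rfl
  have e3 : "; ".toList = [';', ' '] := rfl
  have e4 : " ".toList = [' '] := rfl
  simp only [PySem.Str.rfind, e1, e2, e3, e4]
  exact core (PySem.Str.slice text (some start) (some (start + max_length))).toList start max_length
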